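-- pv_equiv track=rewrite | github.com/euphwes/advent-of-code | 2016/day_6.py | _get_error_corrected_message
-- ===== SOURCE A (Python) =====
-- from collections import defaultdict
--
-- def _get_error_corrected_message(messages, is_modified_repetition_code):
--     """Returns the error corrected message based on the received messages and the frequencies of
--     letters occuring in each position. If it's a modified repeition code, the correct letter is
--     the least-frequent letter to occur in each position, otherwise it's the most frequent."""
--
--     error_corrected_message = ""
--     for i in range(len(messages[0])):
--
--         # Accumulate letter frequencies for the letters in position i across all messages
--         letter_frequency = defaultdict(int)
--         for message in messages:
--             letter_frequency[message[i]] += 1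
--
--         # Turn the letter frequencies into a list of tuples if the form (count, letter) and sort
--         # by count, either in ascending or descending order of frequency depending on whether
--         # this is a modified repetition code.
--         letter_freq_pairs = [
--             (count, letter) for letter, count in letter_frequency.items()
--         ]
--
--         is_reversed_sort = not is_modified_repetition_code
--         letter_freq_pairs.sort(
--             key=lambda count_letter: count_letter[0], reverse=is_reversed_sort
--         )
--
--         # Append the most frequent character for position i to the error_corrected_message
--         error_corrected_message += letter_freq_pairs[0][1]
--
--     return error_corrected_message
-- ===== SOURCE B (Python) =====
-- def _get_error_corrected_message(messages, is_modified_repetition_code):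
--     """One sweep over the messages builds all per-position frequency tables at once
--     (transposed loop order); a second pass picks, per position, the extreme count and
--     the first-inserted letter carrying it (matching A's stable-sort tie-breaking)."""
--     width = len(messages[0])
--     counts = [{} for _ in range(width)]
--     for message in messages:
--         for i, c in enumerate(message[:width]):
--             counts[i][c] = counts[i].get(c, 0) + 1
--     pick = min if is_modified_repetition_code else max
--     out = []
--     for freq in counts:
--         target = pick(freq.values())
--         out.append(next(k for k, v in freq.items() if v == target))
--     return "".join(out)
-- ===== Notes on version B (the rewrite author's own statement) =====
-- stated objective: alternative
-- what changed: Transposes the traversal: a single sweep over the messages fills all per-position frequency tables at once (A re-scans the whole message list once per position), and per position the answer is selected by computing the extreme count over the values and taking the first item carrying it, instead of materialising swapped (count,letter) pairs and stable-sorting them.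
import Mathlib
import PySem

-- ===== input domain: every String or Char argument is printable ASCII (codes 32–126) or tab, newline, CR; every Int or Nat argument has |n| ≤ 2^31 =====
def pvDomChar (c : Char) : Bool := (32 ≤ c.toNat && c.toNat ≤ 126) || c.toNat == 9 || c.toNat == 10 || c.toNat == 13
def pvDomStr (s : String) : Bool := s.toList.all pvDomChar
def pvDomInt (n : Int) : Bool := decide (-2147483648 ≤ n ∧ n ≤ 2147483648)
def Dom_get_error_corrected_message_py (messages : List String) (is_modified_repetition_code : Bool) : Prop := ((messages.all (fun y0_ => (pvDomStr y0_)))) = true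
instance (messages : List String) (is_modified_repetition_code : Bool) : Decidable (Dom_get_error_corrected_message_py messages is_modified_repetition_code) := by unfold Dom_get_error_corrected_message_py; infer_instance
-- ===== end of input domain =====

-- B transposes the traversal (one sweep over the messages fills all per-position frequency
-- tables at once) and selects per position by extreme-count-then-first-match instead of
-- A's per-position rescan, swapped (count,letter) pairs and stable sort; return value only.

-- ===== PORT A =====
-- messages[0] / message[i] are ported as pyGetD with a default; Pre_ restricts to inputs
-- where Python's indexing is in range.
def get_error_corrected_message_py (messages : List String) (is_modified_repetition_code : Bool) : String :=
  let n := (PySem.List.pyGetD messages 0 "").toList.length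
  String.ofList <| (List.range n).foldl (fun acc (i : Nat) =>
    let letter_frequency := messages.foldl
      (fun d message => d.modify (PySem.List.pyGetD message.toList (i : Int) ' ') 0 (· + 1))
      (PySem.Dict.empty : PySem.Dict Char Int)
    let letter_freq_pairs := letter_frequency.items.map (fun lc => (lc.2, lc.1))
    let sorted_pairs := PySem.List.sorted letter_freq_pairs (fun p => p.1) (!is_modified_repetition_code)
    acc ++ [sorted_pairs.headI.2]) []

-- ===== PORT B =====
-- pairwise transcription of "for i, c in enumerate(message[:width]): counts[i][c] = counts[i].get(c, 0) + 1":
-- the enumerate index walks the table in step with the characters of the prefix.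
def pvUpdRow : List (PySem.Dict Char Int) → List Char → List (PySem.Dict Char Int)
  | tbl, [] => tbl
  | [], _ :: _ => []
  | d :: tbl, c :: cs => d.insert c (d.getD c 0 + 1) :: pvUpdRow tbl cs

-- target = min/max(freq.values()); then next(k for k, v in freq.items() if v == target).
-- The 'none' / getD defaults are unreached on a nonempty dict (Python would raise there).
def pvSelect (freq : PySem.Dict Char Int) (is_modified_repetition_code : Bool) : Char :=
  match (if is_modified_repetition_code then PySem.List.min? freq.values (fun v => v)
         else PySem.List.max? freq.values (fun v => v)) with
  | none => ' '
  | some t => ((freq.items.find? (fun kv => kv.2 == t)).map Prod.fst).getD ' '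

-- message[:width] with width : Nat is exactly List.take width.
def get_error_corrected_message_py_alt (messages : List String) (is_modified_repetition_code : Bool) : String :=
  let width := (PySem.List.pyGetD messages 0 "").toList.length
  let counts := messages.foldl (fun tbl message => pvUpdRow tbl (message.toList.take width))
    (List.replicate width (PySem.Dict.empty : PySem.Dict Char Int))
  String.ofList (counts.map (fun freq => pvSelect freq is_modified_repetition_code))

-- ===== PRECONDITION & SPEC =====
-- Pre_ excludes exactly the inputs where Python A raises an IndexError: an empty message list
-- (messages[0]) or some message shorter than messages[0] (message[i]).
def Pre_get_error_corrected_message_py (messages : List String) (is_modified_repetition_code : Bool) : Prop :=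
  messages ≠ [] ∧ ∀ m ∈ messages, messages.headI.toList.length ≤ m.toList.length
instance (messages : List String) (is_modified_repetition_code : Bool) : Decidable (Pre_get_error_corrected_message_py messages is_modified_repetition_code) := by unfold Pre_get_error_corrected_message_py; infer_instance
def pvWitness_get_error_corrected_message_py : List String × Bool := (["abc", "abd", "xbd"], false)

def Spec_get_error_corrected_message_py (messages : List String) (is_modified_repetition_code : Bool) (out : String) : Prop := out = get_error_corrected_message_py_alt messages is_modified_repetition_code
instance (messages : List String) (is_modified_repetition_code : Bool) (out : String) : Decidable (Spec_get_error_corrected_message_py messages is_modified_repetition_code out) := by unfold Spec_get_error_corrected_message_py; infer_instance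

-- ===== CLAIM (what is proved, stated in full; the proofs are below) =====
def Claim_equal_get_error_corrected_message_py : Prop := ∀ (messages : List String) (is_modified_repetition_code : Bool), Dom_get_error_corrected_message_py messages is_modified_repetition_code → Pre_get_error_corrected_message_py messages is_modified_repetition_code → Spec_get_error_corrected_message_py messages is_modified_repetition_code (get_error_corrected_message_py messages is_modified_repetition_code)

-- ===== LEMMAS AND PROOFS =====

-- head? of an insertBy fold follows the min?/max?-style running-extremum recursion
lemma head?_foldl_insertBy {α : Type} (before : α → α → Bool) (l : List α) (acc : List α) :
    (l.foldl (fun a x => PySem.List.insertBy before x a) acc).head? =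
    l.foldl (fun o x => match o with
      | none => some x
      | some m => if before x m then some x else some m) acc.head? := by
  induction l generalizing acc with
  | nil => rfl
  | cons x t ih =>
    rw [List.foldl_cons, List.foldl_cons, ih]
    congr 1
    cases acc with
    | nil => rfl
    | cons h hs =>
      simp only [PySem.List.insertBy]
      split <;> simp_all

-- head of the stable ascending sort is the FIRST minimal element
lemma head?_sorted_eq_min? {α κ : Type} [LinearOrder κ] (l : List α) (key : α → κ) :
    (PySem.List.sorted l key false).head? = PySem.List.min? l key := by
  rw [PySem.List.sorted, PySem.List.min?]
  simp only [Bool.false_eq_true, if_false]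
  rw [head?_foldl_insertBy]
  simp only [List.head?_nil, decide_eq_true_eq]
  rfl

-- head of the stable descending sort is the FIRST maximal element
lemma head?_sorted_rev_eq_max? {α κ : Type} [LinearOrder κ] (l : List α) (key : α → κ) :
    (PySem.List.sorted l key true).head? = PySem.List.max? l key := by
  rw [PySem.List.sorted, PySem.List.max?]
  simp only [if_true]
  rw [head?_foldl_insertBy]
  simp only [List.head?_nil, decide_eq_true_eq]
  rfl

lemma min?_map {α β κ : Type} [LinearOrder κ] (f : α → β) (key : β → κ) (l : List α) :
    PySem.List.min? (l.map f) key = (PySem.List.min? l (fun x => key (f x))).map f := by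
  rw [PySem.List.min?, PySem.List.min?, List.foldl_map]
  suffices h : ∀ (acc : Option α),
      l.foldl (fun o x => match o with
        | none => some (f x)
        | some m => if key (f x) < key m then some (f x) else some m) (acc.map f) =
      (l.foldl (fun o x => match o with
        | none => some x
        | some m => if key (f x) < key (f m) then some x else some m) acc).map f by
    simpa using h none
  intro acc
  induction l generalizing acc with
  | nil => rfl
  | cons x t ih =>
    rw [List.foldl_cons, List.foldl_cons, ← ih]
    congr 1
    cases acc with
    | none => rfl
    | some m => simp only [Option.map_some]; split <;> rfl

lemma max?_map {α β κ : Type} [LinearOrder κ] (f : α → β) (key : β → κ) (l : List α) :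
    PySem.List.max? (l.map f) key = (PySem.List.max? l (fun x => key (f x))).map f := by
  rw [PySem.List.max?, PySem.List.max?, List.foldl_map]
  suffices h : ∀ (acc : Option α),
      l.foldl (fun o x => match o with
        | none => some (f x)
        | some m => if key m < key (f x) then some (f x) else some m) (acc.map f) =
      (l.foldl (fun o x => match o with
        | none => some x
        | some m => if key (f m) < key (f x) then some x else some m) acc).map f by
    simpa using h none
  intro acc
  induction l generalizing acc with
  | nil => rfl
  | cons x t ih =>
    rw [List.foldl_cons, List.foldl_cons, ← ih]
    congr 1
    cases acc with
    | none => rfl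
    | some m => simp only [Option.map_some]; split <;> rfl

lemma headI_of_head? {α : Type} [Inhabited α] {l : List α} {a : α} (h : l.head? = some a) : l.headI = a := by
  cases l <;> simp_all

-- the per-position frequency loop of A builds Counter(chars at position i)
lemma dictA_eq_counter (messages : List String) (i : Nat) :
    messages.foldl (fun d message => d.modify (PySem.List.pyGetD message.toList (i : Int) ' ') 0 (· + 1)) (PySem.Dict.empty : PySem.Dict Char Int)
      = PySem.Dict.counter (messages.map (fun m => PySem.List.pyGetD m.toList (i : Int) ' ')) := by
  rw [PySem.Dict.counter_eq_foldl, List.foldl_map]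

lemma dictB_eq_counter (messages : List String) (i : Nat) :
    messages.foldl (fun d message =>
        let c := PySem.List.pyGetD message.toList (i : Int) ' '
        d.insert c (d.getD c 0 + 1)) (PySem.Dict.empty : PySem.Dict Char Int)
      = PySem.Dict.counter (messages.map (fun m => PySem.List.pyGetD m.toList (i : Int) ' ')) := by
  rw [← PySem.Dict.foldl_insert_getD_add_one_eq_counter, List.foldl_map]

lemma counter_items_ne_nil {κ : Type} [BEq κ] [LawfulBEq κ] (x : κ) (l : List κ) :
    (PySem.Dict.counter (x :: l)).items ≠ [] := by
  intro h
  have hx : x ∈ (PySem.Dict.counter (x :: l)).keys := by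
    rw [PySem.Dict.keys_counter]
    exact (PySem.Set.mem_ofList _ _).2 List.mem_cons_self
  rw [PySem.Dict.keys, h] at hx
  simp at hx

-- ---- first-extremal characterisation: min?/max? as a running extremum, and find? hits it ----

def pvRunMin {α κ : Type} [LinearOrder κ] (key : α → κ) (x : α) (t : List α) : α :=
  t.foldl (fun m y => if key y < key m then y else m) x

def pvRunMax {α κ : Type} [LinearOrder κ] (key : α → κ) (x : α) (t : List α) : α :=
  t.foldl (fun m y => if key m < key y then y else m) x

lemma min?_cons_eq_runMin {α κ : Type} [LinearOrder κ] (key : α → κ) (x : α) (t : List α) :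
    PySem.List.min? (x :: t) key = some (pvRunMin key x t) := by
  rw [PySem.List.min?, List.foldl_cons, pvRunMin]
  induction t generalizing x with
  | nil => rfl
  | cons y t ih =>
    rw [List.foldl_cons, List.foldl_cons]
    by_cases h : key y < key x <;> simp [h, ih]

lemma max?_cons_eq_runMax {α κ : Type} [LinearOrder κ] (key : α → κ) (x : α) (t : List α) :
    PySem.List.max? (x :: t) key = some (pvRunMax key x t) := by
  rw [PySem.List.max?, List.foldl_cons, pvRunMax]
  induction t generalizing x with
  | nil => rfl
  | cons y t ih =>
    rw [List.foldl_cons, List.foldl_cons]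
    by_cases h : key x < key y <;> simp [h, ih]

lemma runMin_key_le {α κ : Type} [LinearOrder κ] (key : α → κ) (x : α) (t : List α) :
    key (pvRunMin key x t) ≤ key x := by
  induction t generalizing x with
  | nil => exact le_refl _
  | cons y t ih =>
    rw [pvRunMin, List.foldl_cons]
    by_cases h : key y < key x
    · simpa [h] using le_of_lt (lt_of_le_of_lt (ih y) h)
    · simpa [h] using ih x

lemma runMax_key_ge {α κ : Type} [LinearOrder κ] (key : α → κ) (x : α) (t : List α) :
    key x ≤ key (pvRunMax key x t) := by
  induction t generalizing x with
  | nil => exact le_refl _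
  | cons y t ih =>
    rw [pvRunMax, List.foldl_cons]
    by_cases h : key x < key y
    · simpa [h] using le_of_lt (lt_of_lt_of_le h (ih y))
    · simpa [h] using ih x

lemma runMin_eq_head_of_key_eq {α κ : Type} [LinearOrder κ] (key : α → κ) (x : α) (t : List α)
    (h : key (pvRunMin key x t) = key x) : pvRunMin key x t = x := by
  induction t generalizing x with
  | nil => rfl
  | cons y t ih =>
    rw [pvRunMin, List.foldl_cons] at h ⊢
    by_cases hy : key y < key x
    · exfalso
      simp only [hy, if_pos] at h
      exact absurd (h ▸ lt_of_le_of_lt (runMin_key_le key y t) hy) (lt_irrefl _)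
    · simp only [hy, if_false] at h ⊢
      exact ih x h

lemma runMax_eq_head_of_key_eq {α κ : Type} [LinearOrder κ] (key : α → κ) (x : α) (t : List α)
    (h : key (pvRunMax key x t) = key x) : pvRunMax key x t = x := by
  induction t generalizing x with
  | nil => rfl
  | cons y t ih =>
    rw [pvRunMax, List.foldl_cons] at h ⊢
    by_cases hy : key x < key y
    · exfalso
      simp only [hy, if_pos] at h
      exact absurd (h ▸ lt_of_lt_of_le hy (runMax_key_ge key y t)) (lt_irrefl _)
    · simp only [hy, if_false] at h ⊢
      exact ih x h

lemma runMin_head_irrel {α κ : Type} [LinearOrder κ] (key : α → κ) (t : List α) :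
    ∀ (x y : α), key x ≤ key y → key (pvRunMin key x t) < key x → pvRunMin key x t = pvRunMin key y t := by
  induction t with
  | nil =>
    intro x y _ h
    exact absurd h (lt_irrefl _)
  | cons z t ih =>
    intro x y hxy h
    rw [pvRunMin, List.foldl_cons] at h ⊢
    rw [pvRunMin, List.foldl_cons]
    by_cases hz : key z < key x
    · have hzy : key z < key y := lt_of_lt_of_le hz hxy
      simp only [hz, hzy, if_pos]
    · simp only [hz, if_false] at h ⊢
      by_cases hzy : key z < key y
      · simp only [hzy, if_pos]
        exact ih x z (le_of_not_gt hz) h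
      · simp only [hzy, if_false]
        exact ih x y hxy h

lemma runMax_head_irrel {α κ : Type} [LinearOrder κ] (key : α → κ) (t : List α) :
    ∀ (x y : α), key y ≤ key x → key x < key (pvRunMax key x t) → pvRunMax key x t = pvRunMax key y t := by
  induction t with
  | nil =>
    intro x y _ h
    exact absurd h (lt_irrefl _)
  | cons z t ih =>
    intro x y hxy h
    rw [pvRunMax, List.foldl_cons] at h ⊢
    rw [pvRunMax, List.foldl_cons]
    by_cases hz : key x < key z
    · have hzy : key y < key z := lt_of_le_of_lt hxy hz
      simp only [hz, hzy, if_pos]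
    · simp only [hz, if_false] at h ⊢
      by_cases hzy : key y < key z
      · simp only [hzy, if_pos]
        exact ih x z (le_of_not_gt hz) h
      · simp only [hzy, if_false]
        exact ih x y hxy h

-- the first element whose key equals the running minimum's key IS the running minimum
lemma find?_runMin {α κ : Type} [LinearOrder κ] (key : α → κ) (t : List α) :
    ∀ (x : α), (x :: t).find? (fun z => key z == key (pvRunMin key x t)) = some (pvRunMin key x t) := by
  induction t with
  | nil =>
    intro x
    simp [pvRunMin, List.find?]
  | cons y t ih =>
    intro x
    have hstep : pvRunMin key x (y :: t) = pvRunMin key (if key y < key x then y else x) t := by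
      rw [pvRunMin, pvRunMin, List.foldl_cons]
    by_cases hy : key y < key x
    · have hm : pvRunMin key x (y :: t) = pvRunMin key y t := by rw [hstep, if_pos hy]
      have hlt : key (pvRunMin key x (y :: t)) < key x := by
        rw [hm]; exact lt_of_le_of_lt (runMin_key_le key y t) hy
      rw [List.find?_cons]
      have : (key x == key (pvRunMin key x (y :: t))) = false := by
        simp [ne_of_gt hlt]
      rw [this, hm]
      exact ih y
    · have hm : pvRunMin key x (y :: t) = pvRunMin key x t := by rw [hstep, if_neg hy]
      by_cases heq : key (pvRunMin key x t) = key x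
      · have hx : pvRunMin key x (y :: t) = x := by
          rw [hm]; exact runMin_eq_head_of_key_eq key x t heq
        rw [List.find?_cons, hx]
        simp
      · have hlt : key (pvRunMin key x t) < key x :=
          lt_of_le_of_ne (runMin_key_le key x t) heq
        have hyy : pvRunMin key x t = pvRunMin key y t :=
          runMin_head_irrel key t x y (le_of_not_gt hy) hlt
        rw [List.find?_cons]
        have : (key x == key (pvRunMin key x (y :: t))) = false := by
          rw [hm]; simp [ne_of_gt hlt]
        rw [this, hm, hyy]
        exact ih y

-- the first element whose key equals the running maximum's key IS the running maximum
lemma find?_runMax {α κ : Type} [LinearOrder κ] (key : α → κ) (t : List α) :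
    ∀ (x : α), (x :: t).find? (fun z => key z == key (pvRunMax key x t)) = some (pvRunMax key x t) := by
  induction t with
  | nil =>
    intro x
    simp [pvRunMax, List.find?]
  | cons y t ih =>
    intro x
    have hstep : pvRunMax key x (y :: t) = pvRunMax key (if key x < key y then y else x) t := by
      rw [pvRunMax, pvRunMax, List.foldl_cons]
    by_cases hy : key x < key y
    · have hm : pvRunMax key x (y :: t) = pvRunMax key y t := by rw [hstep, if_pos hy]
      have hlt : key x < key (pvRunMax key x (y :: t)) := by
        rw [hm]; exact lt_of_lt_of_le hy (runMax_key_ge key y t)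
      rw [List.find?_cons]
      have : (key x == key (pvRunMax key x (y :: t))) = false := by
        simp [ne_of_lt hlt]
      rw [this, hm]
      exact ih y
    · have hm : pvRunMax key x (y :: t) = pvRunMax key x t := by rw [hstep, if_neg hy]
      by_cases heq : key (pvRunMax key x t) = key x
      · have hx : pvRunMax key x (y :: t) = x := by
          rw [hm]; exact runMax_eq_head_of_key_eq key x t heq
        rw [List.find?_cons, hx]
        simp
      · have hlt : key x < key (pvRunMax key x t) :=
          lt_of_le_of_ne (runMax_key_ge key x t) (Ne.symm heq)
        have hyy : pvRunMax key x t = pvRunMax key y t :=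
          runMax_head_irrel key t x y (le_of_not_gt hy) hlt
        rw [List.find?_cons]
        have : (key x == key (pvRunMax key x (y :: t))) = false := by
          rw [hm]; simp [ne_of_lt hlt]
        rw [this, hm, hyy]
        exact ih y

-- ---- the per-position selections of A (sorted head) and B (extreme-then-find) agree ----

lemma select_eq_sorted_head (freq : PySem.Dict Char Int) (b : Bool) (hne : freq.items ≠ []) :
    pvSelect freq b =
      (PySem.List.sorted (freq.items.map (fun lc => (lc.2, lc.1))) (fun p => p.1) (!b)).headI.2 := by
  obtain ⟨x, t, hxt⟩ := List.exists_cons_of_ne_nil hne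
  have hvals : freq.values = freq.items.map Prod.snd := rfl
  rw [pvSelect, hvals, hxt]
  cases b with
  | true =>
    have h1 : PySem.List.min? ((x :: t).map Prod.snd) (fun v => v)
        = some ((pvRunMin (fun kv : Char × Int => kv.2) x t).2) := by
      rw [min?_map, min?_cons_eq_runMin]
      rfl
    have h2 : (x :: t).find? (fun kv => kv.2 == (pvRunMin (fun kv : Char × Int => kv.2) x t).2)
        = some (pvRunMin (fun kv : Char × Int => kv.2) x t) :=
      find?_runMin (fun kv : Char × Int => kv.2) t x
    have hs : (PySem.List.sorted ((x :: t).map (fun lc => (lc.2, lc.1))) (fun p => p.1) false).head?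
        = some ((pvRunMin (fun kv : Char × Int => kv.2) x t).2, (pvRunMin (fun kv : Char × Int => kv.2) x t).1) := by
      rw [head?_sorted_eq_min?, min?_map, min?_cons_eq_runMin]
      rfl
    rw [if_pos rfl, h1, show (!true) = false from rfl, headI_of_head? hs]
    simp [h2]
  | false =>
    have h1 : PySem.List.max? ((x :: t).map Prod.snd) (fun v => v)
        = some ((pvRunMax (fun kv : Char × Int => kv.2) x t).2) := by
      rw [max?_map, max?_cons_eq_runMax]
      rfl
    have h2 : (x :: t).find? (fun kv => kv.2 == (pvRunMax (fun kv : Char × Int => kv.2) x t).2)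
        = some (pvRunMax (fun kv : Char × Int => kv.2) x t) :=
      find?_runMax (fun kv : Char × Int => kv.2) t x
    have hs : (PySem.List.sorted ((x :: t).map (fun lc => (lc.2, lc.1))) (fun p => p.1) true).head?
        = some ((pvRunMax (fun kv : Char × Int => kv.2) x t).2, (pvRunMax (fun kv : Char × Int => kv.2) x t).1) := by
      rw [head?_sorted_rev_eq_max?, max?_map, max?_cons_eq_runMax]
      rfl
    rw [if_neg (by simp), h1, show (!false) = true from rfl, headI_of_head? hs]
    simp [h2]

-- ---- the transposed table of B: i-th entry is the i-th column's counter ----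

lemma pvUpdRow_length (tbl : List (PySem.Dict Char Int)) (cs : List Char) :
    (pvUpdRow tbl cs).length = tbl.length := by
  induction tbl generalizing cs with
  | nil => cases cs <;> rfl
  | cons d tbl ih => cases cs with
    | nil => rfl
    | cons c cs => simpa [pvUpdRow] using ih cs

lemma pvUpdRow_getElem? (tbl : List (PySem.Dict Char Int)) (cs : List Char) (i : Nat) (hi : i < cs.length) :
    (pvUpdRow tbl cs)[i]? = tbl[i]?.map (fun d => d.insert cs[i] (d.getD cs[i] 0 + 1)) := by
  induction tbl generalizing cs i with
  | nil =>
    cases cs with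
    | nil => simp at hi
    | cons c cs => simp [pvUpdRow]
  | cons d tbl ih =>
    cases cs with
    | nil => simp at hi
    | cons c cs =>
      cases i with
      | zero => simp [pvUpdRow]
      | succ i =>
        simp only [pvUpdRow, List.getElem?_cons_succ, List.getElem_cons_succ]
        exact ih cs i (by simpa using hi)

lemma foldl_updRow_length (msgs : List String) (w : Nat) (tbl : List (PySem.Dict Char Int)) :
    (msgs.foldl (fun t m => pvUpdRow t (m.toList.take w)) tbl).length = tbl.length := by
  induction msgs generalizing tbl with
  | nil => rfl
  | cons m msgs ih => rw [List.foldl_cons, ih, pvUpdRow_length]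

lemma foldl_updRow_getElem? (msgs : List String) (w : Nat) (i : Nat) (hi : i < w)
    (hlen : ∀ m ∈ msgs, w ≤ m.toList.length) (tbl : List (PySem.Dict Char Int)) :
    (msgs.foldl (fun t m => pvUpdRow t (m.toList.take w)) tbl)[i]? =
      tbl[i]?.map (fun d => msgs.foldl (fun d m =>
        let c := PySem.List.pyGetD m.toList (i : Int) ' '
        d.insert c (d.getD c 0 + 1)) d) := by
  induction msgs generalizing tbl with
  | nil =>
    simp only [List.foldl_nil]
    cases tbl[i]? <;> rfl
  | cons m msgs ih =>
    have hm : w ≤ m.toList.length := hlen m List.mem_cons_self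
    have hicl : i < m.toList.length := lt_of_lt_of_le hi hm
    have hitake : i < (m.toList.take w).length := by
      rw [List.length_take]; omega
    have hc : (m.toList.take w)[i]'hitake = PySem.List.pyGetD m.toList (i : Int) ' ' := by
      rw [List.getElem_take, PySem.List.pyGetD_natCast, List.getD_eq_getElem _ _ hicl]
    rw [List.foldl_cons, ih (fun m hm => hlen m (List.mem_cons_of_mem _ hm)),
      pvUpdRow_getElem? tbl (m.toList.take w) i hitake, Option.map_map]
    congr 1
    funext d
    simp only [Function.comp_apply, List.foldl_cons, hc]

-- ===== VERDICT (by name: the statement is the Claim_ definition above) =====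
theorem get_error_corrected_message_py_spec : Claim_equal_get_error_corrected_message_py := by
  intro messages b _hdom hpre
  unfold Spec_get_error_corrected_message_py
  obtain ⟨hne, hlen⟩ := hpre
  obtain ⟨m0, rest, rfl⟩ := List.exists_cons_of_ne_nil hne
  unfold get_error_corrected_message_py get_error_corrected_message_py_alt
  simp only [List.headI] at hlen
  set w := (PySem.List.pyGetD (m0 :: rest) 0 "").toList.length with hw
  have hw0 : w = m0.toList.length := by
    rw [hw, show ((0 : Int) = ((0 : Nat) : Int)) from rfl, PySem.List.pyGetD_natCast]
    rfl
  have hlen' : ∀ m ∈ (m0 :: rest), w ≤ m.toList.length := by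
    intro m hm; rw [hw0]; exact hlen m hm
  set counts := (m0 :: rest).foldl (fun tbl message => pvUpdRow tbl (message.toList.take w))
    (List.replicate w (PySem.Dict.empty : PySem.Dict Char Int)) with hcounts
  have hclen : counts.length = w := by
    rw [hcounts, foldl_updRow_length, List.length_replicate]
  have hcget : ∀ i : Nat, i < w →
      counts[i]? = some (PySem.Dict.counter ((m0 :: rest).map (fun m => PySem.List.pyGetD m.toList (i : Int) ' '))) := by
    intro i hi
    rw [hcounts, foldl_updRow_getElem? _ w i hi hlen', List.getElem?_replicate_of_lt hi,
      Option.map_some, dictB_eq_counter]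
  -- B's output list equals the range-indexed list of per-column selections
  have hB : counts.map (fun freq => pvSelect freq b)
      = (List.range w).map (fun (i : Nat) => pvSelect (PySem.Dict.counter ((m0 :: rest).map (fun m => PySem.List.pyGetD m.toList (i : Int) ' '))) b) := by
    apply List.ext_getElem?
    intro i
    by_cases hi : i < w
    · rw [List.getElem?_map, List.getElem?_map, hcget i hi, List.getElem?_range hi]
      rfl
    · have h1 : counts.length ≤ i := by omega
      have h2 : (List.range w).length ≤ i := by simpa using not_lt.mp hi
      rw [List.getElem?_map, List.getElem?_map, List.getElem?_eq_none h1,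
        List.getElem?_eq_none h2]
      rfl
  -- A's appending fold is the same range-indexed map of sorted heads
  have hA : ∀ (g : Nat → Char), (List.range w).foldl (fun acc i => acc ++ [g i]) [] = (List.range w).map g := by
    intro g
    rw [PySem.List.foldl_append_singleton_eq_map g (List.range w) [], List.nil_append]
  simp only []
  rw [hA, hB]
  congr 1
  apply List.map_congr_left
  intro i _
  have hcol : (m0 :: rest).map (fun m => PySem.List.pyGetD m.toList (i : Int) ' ')
      = (PySem.List.pyGetD m0.toList (i : Int) ' ') :: rest.map (fun m => PySem.List.pyGetD m.toList (i : Int) ' ') := rfl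
  rw [dictA_eq_counter]
  rw [select_eq_sorted_head _ b (by rw [hcol]; exact counter_items_ne_nil _ _)]
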